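-- pv_equiv track=rewrite | github.com/Client-Specific-Equivalence-Checker/CLEVER | examples/equiv/is_prime1.py | lib1
-- ===== SOURCE A (Python) =====
-- primes = [ 2, 3, 5, 7, 11, 13, 17, 19 ]
--
-- def lib1(x, b):
--   if (b == 0):
--     return 0
--   else:
--     for p in primes:
--       mod = x % p
--       if (mod == 0):
--         return 0
--   return 1
-- ===== SOURCE B (Python) =====
-- import math
--
-- _P = 2 * 3 * 5 * 7 * 11 * 13 * 17 * 19  # product of the eight listed primes
--
-- def lib1(x, b):
--     if b == 0:
--         return 0
--     return 0 if math.gcd(x, _P) != 1 else 1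
-- ===== Notes on version B (the rewrite author's own statement) =====
-- stated objective: simpler
-- what changed: Replaces the loop over the eight primes with a single gcd test against their precomputed product (x shares a factor with the product exactly when some listed prime divides x).
import Mathlib
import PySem

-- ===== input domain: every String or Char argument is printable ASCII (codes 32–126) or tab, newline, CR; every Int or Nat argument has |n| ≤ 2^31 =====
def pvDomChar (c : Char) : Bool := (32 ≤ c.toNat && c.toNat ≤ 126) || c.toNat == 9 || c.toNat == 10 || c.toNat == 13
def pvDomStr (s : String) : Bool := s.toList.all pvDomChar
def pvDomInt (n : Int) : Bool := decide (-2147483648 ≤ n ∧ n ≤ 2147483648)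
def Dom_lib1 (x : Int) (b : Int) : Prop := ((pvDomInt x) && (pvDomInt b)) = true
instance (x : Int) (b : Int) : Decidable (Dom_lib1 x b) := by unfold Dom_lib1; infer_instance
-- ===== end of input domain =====

-- B replaces the eight-way divisibility loop with one gcd test against the primes' product (simpler).

-- ===== PORT A =====
def lib1Primes : List Int := [2, 3, 5, 7, 11, 13, 17, 19]

-- the for-loop with early return: first divisor found returns 0, exhausted list returns 1
def lib1Loop (x : Int) : List Int → Int
  | [] => 1
  | p :: ps => if PySem.Int.mod x p = 0 then 0 else lib1Loop x ps

def lib1 (x : Int) (b : Int) : Int :=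
  if b = 0 then 0 else lib1Loop x lib1Primes

-- ===== PORT B =====
def lib1P : Int := 2 * 3 * 5 * 7 * 11 * 13 * 17 * 19

def lib1_alt (x : Int) (b : Int) : Int :=
  if b = 0 then 0 else if Int.gcd x lib1P ≠ 1 then 0 else 1

-- ===== PRECONDITION & SPEC =====
def Spec_lib1 (x : Int) (b : Int) (out : Int) : Prop := out = lib1_alt x b
instance (x : Int) (b : Int) (out : Int) : Decidable (Spec_lib1 x b out) := by unfold Spec_lib1; infer_instance

-- ===== CLAIM (what is proved, stated in full; the proofs are below) =====
def Claim_equal_lib1 : Prop := ∀ (x : Int) (b : Int), Dom_lib1 x b → Spec_lib1 x b (lib1 x b)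

-- ===== LEMMAS AND PROOFS =====

-- gcd(x, 2*3*5*7*11*13*17*19) = 1 iff none of the eight primes divides x
theorem lib1_gcd_iff (x : Int) :
    Int.gcd x lib1P = 1 ↔ ∀ p ∈ lib1Primes, ¬ p ∣ x := by
  constructor
  · intro h p hp hdvd
    have hpP : p.natAbs ∣ lib1P.natAbs := by fin_cases hp <;> decide
    have hx : p.natAbs ∣ x.natAbs := Int.natAbs_dvd_natAbs.mpr hdvd
    have hg : p.natAbs ∣ Int.gcd x lib1P := Nat.dvd_gcd hx hpP
    rw [h] at hg
    rw [Nat.dvd_one] at hg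
    fin_cases hp <;> simp_all
  · intro h
    have hn : ∀ p ∈ lib1Primes, ¬ p.natAbs ∣ x.natAbs := by
      intro p hp hd
      exact h p hp (by
        have := Int.natCast_dvd_natCast.mpr hd
        simpa [Int.dvd_natAbs, Int.natAbs_dvd] using this)
    have h2 := hn 2 (by simp [lib1Primes])
    have h3 := hn 3 (by simp [lib1Primes])
    have h5 := hn 5 (by simp [lib1Primes])
    have h7 := hn 7 (by simp [lib1Primes])
    have h11 := hn 11 (by simp [lib1Primes])
    have h13 := hn 13 (by simp [lib1Primes])
    have h17 := hn 17 (by simp [lib1Primes])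
    have h19 := hn 19 (by simp [lib1Primes])
    show Int.gcd x lib1P = 1
    have : Nat.Coprime x.natAbs (2 * 3 * 5 * 7 * 11 * 13 * 17 * 19) := by
      simp only [Nat.coprime_mul_iff_right]
      refine ⟨⟨⟨⟨⟨⟨⟨?_, ?_⟩, ?_⟩, ?_⟩, ?_⟩, ?_⟩, ?_⟩, ?_⟩
      · exact ((Nat.coprime_comm).mpr ((Nat.Prime.coprime_iff_not_dvd (by norm_num)).mpr h2))
      · exact ((Nat.coprime_comm).mpr ((Nat.Prime.coprime_iff_not_dvd (by norm_num)).mpr h3))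
      · exact ((Nat.coprime_comm).mpr ((Nat.Prime.coprime_iff_not_dvd (by norm_num)).mpr h5))
      · exact ((Nat.coprime_comm).mpr ((Nat.Prime.coprime_iff_not_dvd (by norm_num)).mpr h7))
      · exact ((Nat.coprime_comm).mpr ((Nat.Prime.coprime_iff_not_dvd (by norm_num)).mpr h11))
      · exact ((Nat.coprime_comm).mpr ((Nat.Prime.coprime_iff_not_dvd (by norm_num)).mpr h13))
      · exact ((Nat.coprime_comm).mpr ((Nat.Prime.coprime_iff_not_dvd (by norm_num)).mpr h17))
      · exact ((Nat.coprime_comm).mpr ((Nat.Prime.coprime_iff_not_dvd (by norm_num)).mpr h19))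
    simpa [Int.gcd, lib1P] using this

theorem lib1_loop_eq (x : Int) :
    lib1Loop x lib1Primes = if Int.gcd x lib1P = 1 then 1 else 0 := by
  by_cases h : Int.gcd x lib1P = 1
  · have hnone := (lib1_gcd_iff x).mp h
    simp only [lib1Primes] at hnone ⊢
    simp only [lib1Loop]
    rw [if_neg, if_neg, if_neg, if_neg, if_neg, if_neg, if_neg, if_neg, if_pos h] <;>
      · rw [PySem.Int.mod_eq_zero_iff_dvd]
        exact hnone _ (by simp)
  · rw [if_neg h]
    have hex : ∃ p ∈ lib1Primes, p ∣ x := by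
      by_contra hc
      push Not at hc
      exact h ((lib1_gcd_iff x).mpr hc)
    obtain ⟨p, hp, hdvd⟩ := hex
    fin_cases hp <;>
      · simp only [lib1Primes, lib1Loop, PySem.Int.mod_eq_zero_iff_dvd]
        simp [hdvd]

-- ===== VERDICT (by name: the statement is the Claim_ definition above) =====
theorem lib1_spec : Claim_equal_lib1 := by
  intro x b _
  unfold Spec_lib1 lib1 lib1_alt
  by_cases hb : b = 0
  · simp [hb]
  · simp only [hb, if_false, lib1_loop_eq x]
    by_cases h : Int.gcd x lib1P = 1 <;> simp [h]
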